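-- pv_equiv track=rewrite | github.com/wuwuzhijing/AIDev | unified_ai_cli_manager.py | render_proxy_commands
-- ===== SOURCE A (Python) =====
-- def render_proxy_commands(shell_name: str, envs: dict[str, str]) -> str:
--     shell_name = shell_name.lower()
--
--     if shell_name in ("powershell", "pwsh"):
--         parts = [f"$env:{k}='{v}'" for k, v in envs.items()]
--         return "; ".join(parts)
--
--     if shell_name == "cmd":
--         lines = [f"set {k}={v}" for k, v in envs.items()]
--         return "\n".join(lines)
--
--     if shell_name in ("bash", "zsh", "sh"):
--         lines = [f'export {k}="{v}"' for k, v in envs.items()]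
--         return "\n".join(lines)
--
--     raise ValueError(f"unsupported shell: {shell_name}")
-- ===== SOURCE B (Python) =====
-- # Different decomposition: no per-branch list comprehension + join; instead one
-- # parameterised recursive emitter that concatenates the output string directly,
-- # inserting the separator between consecutive items as it recurses.
--
-- def _emit(items, pre, mid, post, sep):
--     if not items:
--         return ""
--     (k, v), rest = items[0], items[1:]
--     piece = pre + k + mid + v + post
--     if not rest:
--         return piece
--     return piece + sep + _emit(rest, pre, mid, post, sep)
--
--
-- def render_proxy_commands(shell_name: str, envs: dict[str, str]) -> str:
--     shell_name = shell_name.lower()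
--     items = list(envs.items())
--     if shell_name in ("powershell", "pwsh"):
--         return _emit(items, "$env:", "='", "'", "; ")
--     if shell_name == "cmd":
--         return _emit(items, "set ", "=", "", "\n")
--     if shell_name in ("bash", "zsh", "sh"):
--         return _emit(items, "export ", '="', '"', "\n")
--     raise ValueError(f"unsupported shell: {shell_name}")
-- ===== Notes on version B (the rewrite author's own statement) =====
-- stated objective: alternative
-- what changed: Replaces the three branch-local list-comprehension-then-join passes by one shared recursive emitter that builds the output string directly, threading the (prefix, mid, suffix, separator) parameters and inserting the separator between consecutive items during the recursion.
import Mathlib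
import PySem

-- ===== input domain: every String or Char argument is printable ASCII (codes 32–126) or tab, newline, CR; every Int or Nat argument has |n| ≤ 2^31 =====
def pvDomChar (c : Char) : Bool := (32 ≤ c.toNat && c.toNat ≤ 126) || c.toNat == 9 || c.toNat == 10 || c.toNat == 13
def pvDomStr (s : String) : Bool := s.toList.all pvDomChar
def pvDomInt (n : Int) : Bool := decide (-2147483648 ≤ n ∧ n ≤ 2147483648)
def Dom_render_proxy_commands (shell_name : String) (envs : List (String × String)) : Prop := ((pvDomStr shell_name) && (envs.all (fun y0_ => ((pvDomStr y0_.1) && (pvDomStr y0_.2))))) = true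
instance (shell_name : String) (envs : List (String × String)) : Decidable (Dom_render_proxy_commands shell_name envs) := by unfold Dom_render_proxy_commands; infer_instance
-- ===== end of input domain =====

-- B replaces A's three comprehension+join passes by one shared recursive emitter that
-- concatenates the output directly, inserting the separator between items (objective: alternative).

-- ===== PORT A =====
-- A raises ValueError on unsupported shells; the port returns "" there (excluded by Pre_).
def render_proxy_commands (shell_name : String) (envs : List (String × String)) : String :=
  let sn := PySem.Str.lower shell_name
  if sn = "powershell" ∨ sn = "pwsh" then
    PySem.Str.join "; " (envs.map (fun kv => "$env:" ++ kv.1 ++ "='" ++ kv.2 ++ "'"))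
  else if sn = "cmd" then
    PySem.Str.join "\n" (envs.map (fun kv => "set " ++ kv.1 ++ "=" ++ kv.2))
  else if sn = "bash" ∨ sn = "zsh" ∨ sn = "sh" then
    PySem.Str.join "\n" (envs.map (fun kv => "export " ++ kv.1 ++ "=\"" ++ kv.2 ++ "\""))
  else
    ""  -- raise ValueError

-- ===== PORT B =====
-- recursive emitter of Source B: builds the output string directly, separator between items
def pvEmit (items : List (String × String)) (pre mid post sep : String) : String :=
  match items with
  | [] => ""
  | (k, v) :: rest =>
    let piece := pre ++ k ++ mid ++ v ++ post
    match rest with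
    | [] => piece
    | _ :: _ => piece ++ sep ++ pvEmit rest pre mid post sep

def render_proxy_commands_alt (shell_name : String) (envs : List (String × String)) : String :=
  let sn := PySem.Str.lower shell_name
  if sn = "powershell" ∨ sn = "pwsh" then
    pvEmit envs "$env:" "='" "'" "; "
  else if sn = "cmd" then
    pvEmit envs "set " "=" "" "\n"
  else if sn = "bash" ∨ sn = "zsh" ∨ sn = "sh" then
    pvEmit envs "export " "=\"" "\"" "\n"
  else
    ""  -- raise ValueError

-- ===== PRECONDITION & SPEC =====
-- A raises ValueError when the lowercased shell name is not one of the six supported names.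
def Pre_render_proxy_commands (shell_name : String) (envs : List (String × String)) : Prop :=
  PySem.Str.lower shell_name ∈
    (["powershell", "pwsh", "cmd", "bash", "zsh", "sh"] : List String)
instance (shell_name : String) (envs : List (String × String)) : Decidable (Pre_render_proxy_commands shell_name envs) := by unfold Pre_render_proxy_commands; infer_instance

def pvWitness_render_proxy_commands : String × (List (String × String)) :=
  ("Bash", [("HTTP_PROXY", "http://127.0.0.1:7890")])

def Spec_render_proxy_commands (shell_name : String) (envs : List (String × String)) (out : String) : Prop := out = render_proxy_commands_alt shell_name envs
instance (shell_name : String) (envs : List (String × String)) (out : String) : Decidable (Spec_render_proxy_commands shell_name envs out) := by unfold Spec_render_proxy_commands; infer_instance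

-- ===== CLAIM (what is proved, stated in full; the proofs are below) =====
def Claim_equal_render_proxy_commands : Prop := ∀ (shell_name : String) (envs : List (String × String)), Dom_render_proxy_commands shell_name envs → Pre_render_proxy_commands shell_name envs → Spec_render_proxy_commands shell_name envs (render_proxy_commands shell_name envs)

-- ===== LEMMAS AND PROOFS =====
-- join of the mapped pieces equals the direct recursive emission
theorem join_map_eq_pvEmit (pre mid post sep : String) :
    ∀ (envs : List (String × String)),
      PySem.Str.join sep (envs.map (fun kv => pre ++ kv.1 ++ mid ++ kv.2 ++ post))
        = pvEmit envs pre mid post sep := by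
  intro envs
  induction envs with
  | nil =>
    apply String.toList_inj.mp
    simp [pvEmit, PySem.Str.toList_join, PySem.Chars.join_nil]
  | cons kv rest ih =>
    cases rest with
    | nil =>
      apply String.toList_inj.mp
      simp [pvEmit, PySem.Str.toList_join, PySem.Chars.join_singleton]
    | cons kv2 rest2 =>
      have ih' := congrArg String.toList ih
      apply String.toList_inj.mp
      rw [show pvEmit (kv :: kv2 :: rest2) pre mid post sep
            = (pre ++ kv.1 ++ mid ++ kv.2 ++ post) ++ sep
                ++ pvEmit (kv2 :: rest2) pre mid post sep from rfl]
      simp only [List.map_cons, PySem.Str.toList_join, String.toList_append] at ih' ⊢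
      rw [PySem.Chars.join_cons_cons, ih']

-- ===== VERDICT (by name: the statement is the Claim_ definition above) =====
theorem render_proxy_commands_spec : Claim_equal_render_proxy_commands := by
  intro shell_name envs _ hpre
  unfold Spec_render_proxy_commands render_proxy_commands render_proxy_commands_alt
  unfold Pre_render_proxy_commands at hpre
  simp only [List.mem_cons, List.not_mem_nil, or_false] at hpre
  rcases hpre with h | h | h | h | h | h <;>
    simp only [h, String.reduceEq, or_self, or_true, true_or, or_false, false_or,
      if_true, if_false, reduceIte] <;>
    rw [← join_map_eq_pvEmit] <;> simp
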